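-- pv_equiv track=rewrite | github.com/marlcplhra/SSCard | compares/lplm/correct_ground_truth.py | LIKE_pattern_to_newLanguage
-- ===== SOURCE A (Python) =====
-- def LIKE_pattern_to_newLanguage(liste):
--     transformed_pattern = ''
--     for pattern in liste:
--         if len(pattern) == 1:
--             transformed_pattern += pattern
--         else:
--             new_pattern = ''
--             count = 0
--             for char in pattern:
--                 if count < 1:
--                     new_pattern += char
--                     count += 1
--                 else:
--                     if (
--                         new_pattern[-1] not in ('_', '@')
--                         and char not in ('_', '@')
--                     ):
--                         # new_pattern += char + '$'
--                         new_pattern += '$' + char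
--                     else:
--                         new_pattern += char
--             transformed_pattern += new_pattern
--     transformed_pattern = transformed_pattern.replace('_', '^')
--     return transformed_pattern
-- ===== SOURCE B (Python) =====
-- def LIKE_pattern_to_newLanguage(liste):
--     pieces = []
--     for pattern in liste:
--         i, n = 0, len(pattern)
--         while i < n:
--             special = pattern[i] in '_@'
--             j = i + 1
--             while j < n and (pattern[j] in '_@') == special:
--                 j += 1
--             run = pattern[i:j]
--             pieces.append(run if special else '$'.join(run))
--             i = j
--     return ''.join(pieces).replace('_', '^')
-- ===== Notes on version B (the rewrite author's own statement) =====
-- stated objective: alternative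
-- what changed: A's stateful per-character loop (count flag plus peek at the last emitted char) is replaced by a run tokenizer: each pattern is split into maximal runs of special (underscore/at-sign) vs non-special characters with a two-pointer scan, non-special runs are dollar-joined, runs are collected into a list joined once, and the underscore-to-caret replace runs at the end; A's len==1 special case disappears.
import Mathlib
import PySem

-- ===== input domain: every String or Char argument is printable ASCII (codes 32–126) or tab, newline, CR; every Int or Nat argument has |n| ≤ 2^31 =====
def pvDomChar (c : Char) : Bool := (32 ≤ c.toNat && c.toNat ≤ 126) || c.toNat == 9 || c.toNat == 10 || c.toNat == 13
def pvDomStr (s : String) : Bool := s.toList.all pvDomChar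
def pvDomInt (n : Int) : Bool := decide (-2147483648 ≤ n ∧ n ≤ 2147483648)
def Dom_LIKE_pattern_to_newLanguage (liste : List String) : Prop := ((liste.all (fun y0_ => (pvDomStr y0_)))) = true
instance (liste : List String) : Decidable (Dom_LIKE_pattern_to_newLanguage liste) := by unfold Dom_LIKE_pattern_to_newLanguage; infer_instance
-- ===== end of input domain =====

-- B replaces A's stateful per-character loop by a run tokenizer: maximal runs of
-- special ('_','@') vs non-special characters, '$'-joining the non-special runs.
-- Objective: alternative decomposition, same cost.

-- ===== PORT A =====
-- one step of A's inner 'for char in pattern' loop; state = (new_pattern, count)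
def pvAstep (st : List Char × Int) (char : Char) : List Char × Int :=
  if st.2 < 1 then (st.1 ++ [char], st.2 + 1)
  else
    match st.1.getLast? with
    | none => (st.1 ++ [char], st.2)  -- unreachable: count ≥ 1 ⇒ new_pattern ≠ '' (Python new_pattern[-1])
    | some last =>
      if (last ≠ '_' && last ≠ '@') && (char ≠ '_' && char ≠ '@')
      then (st.1 ++ ['$', char], st.2)
      else (st.1 ++ [char], st.2)

def pvA_inner (pattern : List Char) : List Char :=
  (pattern.foldl pvAstep ([], 0)).1

def LIKE_pattern_to_newLanguage (liste : List String) : String :=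
  PySem.Str.replace
    (String.ofList (liste.foldl (fun acc pattern =>
      if PySem.Str.len pattern == 1 then acc ++ pattern.toList
      else acc ++ pvA_inner pattern.toList) ([] : List Char)))
    "_" "^"

-- ===== PORT B =====
def pvSpecial (c : Char) : Bool := c == '_' || c == '@'

-- Source B's outer while over one pattern: peel the maximal run at the front
-- (the inner 'while j < n …' scan = takeWhile/dropWhile), '$'-join non-special runs
def pvRuns (l : List Char) : List Char :=
  match l with
  | [] => []
  | c :: cs =>
    let special := pvSpecial c
    let run := c :: cs.takeWhile (fun x => pvSpecial x == special)
    let rest := cs.dropWhile (fun x => pvSpecial x == special)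
    (if special then run else List.intersperse '$' run) ++ pvRuns rest
termination_by l.length
decreasing_by
  have := List.length_dropWhile_le (fun x => pvSpecial x == pvSpecial c) cs
  simp only [List.length_cons]
  omega

def LIKE_pattern_to_newLanguage_alt (liste : List String) : String :=
  PySem.Str.replace
    (String.ofList (liste.foldl (fun acc pattern => acc ++ pvRuns pattern.toList) ([] : List Char)))
    "_" "^"

-- ===== PRECONDITION & SPEC =====
def Spec_LIKE_pattern_to_newLanguage (liste : List String) (out : String) : Prop := out = LIKE_pattern_to_newLanguage_alt liste
instance (liste : List String) (out : String) : Decidable (Spec_LIKE_pattern_to_newLanguage liste out) := by unfold Spec_LIKE_pattern_to_newLanguage; infer_instance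

-- ===== CLAIM (what is proved, stated in full; the proofs are below) =====
def Claim_equal_LIKE_pattern_to_newLanguage : Prop := ∀ (liste : List String), Dom_LIKE_pattern_to_newLanguage liste → Spec_LIKE_pattern_to_newLanguage liste (LIKE_pattern_to_newLanguage liste)

-- ===== LEMMAS AND PROOFS =====

-- the characters A's loop appends after the first one, given the previous original character
def pvGlue (prev : Char) : List Char → List Char
  | [] => []
  | c :: cs =>
      (if !pvSpecial prev && !pvSpecial c then ['$', c] else [c]) ++ pvGlue c cs

def pvGlueAll : List Char → List Char
  | [] => []
  | c :: cs => c :: pvGlue c cs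

lemma pvCond_eq (a b : Char) :
    ((a ≠ '_' && a ≠ '@') && (b ≠ '_' && b ≠ '@')) = (!pvSpecial a && !pvSpecial b) := by
  by_cases h1 : a = '_' <;> by_cases h2 : a = '@' <;> by_cases h3 : b = '_' <;>
    by_cases h4 : b = '@' <;> simp [pvSpecial, h1, h2, h3, h4]

lemma pvA_loop_spec (l : List Char) : ∀ (acc : List Char) (prev : Char),
    l.foldl pvAstep (acc ++ [prev], 1) = (acc ++ [prev] ++ pvGlue prev l, 1) := by
  induction l with
  | nil => intro acc prev; simp [pvGlue]
  | cons c cs ih =>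
      intro acc prev
      have hlast : (acc ++ [prev]).getLast? = some prev := by simp
      by_cases h : (!pvSpecial prev && !pvSpecial c) = true
      · have hs : pvAstep (acc ++ [prev], 1) c = ((acc ++ [prev]) ++ ['$', c], 1) := by
          simp only [pvAstep]; rw [if_neg (by omega)]
          simp only [hlast, pvCond_eq, h, if_true]
        rw [List.foldl_cons, hs]
        have h2 := ih ((acc ++ [prev]) ++ ['$']) c
        simp only [List.append_assoc] at h2 ⊢
        simpa [pvGlue, h, List.append_assoc] using h2
      · have hs : pvAstep (acc ++ [prev], 1) c = ((acc ++ [prev]) ++ [c], 1) := by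
          simp only [pvAstep]; rw [if_neg (by omega)]
          simp only [hlast]
          rw [pvCond_eq]
          have h' : (!pvSpecial prev && !pvSpecial c) = false := by simpa using h
          simp [h']
        rw [List.foldl_cons, hs]
        have h2 := ih (acc ++ [prev]) c
        simp only [List.append_assoc] at h2 ⊢
        simpa [pvGlue, h, List.append_assoc] using h2

lemma pvA_inner_cons (c : Char) (cs : List Char) :
    pvA_inner (c :: cs) = pvGlueAll (c :: cs) := by
  have hs : pvAstep ([], 0) c = (([] : List Char) ++ [c], 1) := by simp [pvAstep]
  unfold pvA_inner
  rw [List.foldl_cons, hs, pvA_loop_spec cs [] c]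
  simp [pvGlueAll]

-- gluing through a maximal special run copies characters verbatim, then restarts
lemma pvGlue_specialrun (cs : List Char) : ∀ (c : Char), pvSpecial c = true →
    cs.takeWhile (fun x => pvSpecial x == true)
      ++ pvGlueAll (cs.dropWhile (fun x => pvSpecial x == true)) = pvGlue c cs := by
  induction cs with
  | nil => intro c h; simp [pvGlueAll, pvGlue]
  | cons d ds ih =>
      intro c h
      by_cases hd : pvSpecial d = true
      · simp only [List.takeWhile_cons, List.dropWhile_cons, hd, beq_self_eq_true, if_true,
          List.cons_append, pvGlue, h, Bool.not_true, Bool.false_and, Bool.false_eq_true,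
          if_false, List.cons.injEq, true_and]
        exact ih d hd
      · have hd' : pvSpecial d = false := by simpa using hd
        simp [pvGlue, pvGlueAll, h, hd']

-- gluing from a non-special character = '$'-join the maximal non-special run, then restart
lemma pvGlue_nonspecial (cs : List Char) : ∀ (c : Char), pvSpecial c = false →
    c :: pvGlue c cs
      = List.intersperse '$' (c :: cs.takeWhile (fun x => pvSpecial x == false))
        ++ pvGlueAll (cs.dropWhile (fun x => pvSpecial x == false)) := by
  induction cs with
  | nil => intro c h; simp [pvGlue, pvGlueAll]
  | cons d ds ih =>
      intro c h
      by_cases hd : pvSpecial d = true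
      · simp [pvGlue, pvGlueAll, h, hd]
      · have hd' : pvSpecial d = false := by simpa using hd
        have := ih d hd'
        simp only [pvGlue, h, hd', Bool.not_false, Bool.and_self, if_true,
          List.takeWhile_cons, List.dropWhile_cons, beq_self_eq_true] at *
        simp [List.intersperse, this]

lemma pvRuns_glueAll_bounded : ∀ (n : Nat) (l : List Char), l.length ≤ n → pvRuns l = pvGlueAll l := by
  intro n
  induction n with
  | zero =>
      intro l hl
      have : l = [] := by cases l <;> simp_all
      simp [this, pvRuns, pvGlueAll]
  | succ n ihn =>
      intro l hl
      cases l with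
      | nil => simp [pvRuns, pvGlueAll]
      | cons c cs =>
          have hstep : pvRuns (c :: cs)
              = (if pvSpecial c
                 then (c :: cs.takeWhile (fun x => pvSpecial x == pvSpecial c))
                 else List.intersperse '$' (c :: cs.takeWhile (fun x => pvSpecial x == pvSpecial c)))
                ++ pvRuns (cs.dropWhile (fun x => pvSpecial x == pvSpecial c)) := by
            rw [pvRuns]
          have hdrop : (cs.dropWhile (fun x => pvSpecial x == pvSpecial c)).length ≤ n := by
            have := List.length_dropWhile_le (fun x => pvSpecial x == pvSpecial c) cs
            simp only [List.length_cons] at hl; omega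
          rw [hstep, ihn _ hdrop]
          have hGA : pvGlueAll (c :: cs) = c :: pvGlue c cs := rfl
          by_cases h : pvSpecial c = true
          · rw [hGA, if_pos h, h, List.cons_append]
            exact congrArg (c :: ·) (pvGlue_specialrun cs c h)
          · have h' : pvSpecial c = false := by simpa using h
            rw [hGA, if_neg h, h']
            exact (pvGlue_nonspecial cs c h').symm

lemma pvRuns_glueAll (l : List Char) : pvRuns l = pvGlueAll l :=
  pvRuns_glueAll_bounded l.length l le_rfl

-- per-pattern agreement: A's branch (len==1 special case or inner loop) equals B's run tokenizer
lemma pv_pattern_eq (pattern : String) :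
    (if PySem.Str.len pattern == 1 then pattern.toList else pvA_inner pattern.toList)
      = pvRuns pattern.toList := by
  rw [pvRuns_glueAll]
  cases hl : pattern.toList with
  | nil => simp [hl, PySem.Str.len_eq, pvA_inner, pvGlueAll]
  | cons c cs =>
      cases cs with
      | nil => simp [hl, PySem.Str.len_eq, pvGlueAll, pvGlue]
      | cons b rest =>
          have hlen : (PySem.Str.len pattern == 1) = false := by
            simp [PySem.Str.len_eq, hl]
            omega
          simp only [hlen, Bool.false_eq_true, if_false]
          exact pvA_inner_cons c (b :: rest)

-- ===== VERDICT (by name: the statement is the Claim_ definition above) =====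
theorem LIKE_pattern_to_newLanguage_spec : Claim_equal_LIKE_pattern_to_newLanguage := by
  intro liste _
  unfold Spec_LIKE_pattern_to_newLanguage LIKE_pattern_to_newLanguage LIKE_pattern_to_newLanguage_alt
  have hf : (fun (acc : List Char) (pattern : String) =>
        if PySem.Str.len pattern == 1 then acc ++ pattern.toList
        else acc ++ pvA_inner pattern.toList)
      = fun acc pattern => acc ++ pvRuns pattern.toList := by
    funext acc pattern
    rw [← pv_pattern_eq pattern]
    split <;> rfl
  rw [hf]
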